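-- pv_equiv track=rewrite | github.com/gglou/gpu-matmul | profiler/ptx_report.py | _group_counts
-- ===== SOURCE A (Python) =====
-- from collections import Counter, OrderedDict
--
-- SUMMARY_GROUPS = OrderedDict([
--     ("FP32 Compute",  ["FP32 FMA", "FP32 Mul", "FP32 Add", "FP32 Other"]),
--     ("FP64",          ["FP64"]),
--     ("Integer",       ["Integer Arith", "Bit / Logic", "Address / LEA", "Conversion"]),
--     ("Data Movement", ["Move / Select", "Load Param", "Load Const"]),
--     ("Global Memory", ["Load Global", "Store Global"]),
--     ("Shared Memory", ["Load Shared", "Store Shared"]),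
--     ("Async Copy",    ["Async Copy"]),
--     ("Control Flow",  ["Branch", "Barrier / Sync", "Predicate"]),
--     ("Misc / NOP",    ["Misc / NOP", "Atomic", "Warp Ops"]),
-- ])
--
-- def _group_counts(detail: dict[str, int]) -> dict[str, int]:
--     result = OrderedDict()
--     for group, cats in SUMMARY_GROUPS.items():
--         total = sum(detail.get(c, 0) for c in cats)
--         if total > 0:
--             result[group] = total
--     unk = detail.get("Unknown", 0)
--     if unk > 0:
--         result["Unknown"] = unk
--     return result
-- ===== SOURCE B (Python) =====
-- from collections import OrderedDict
--
-- SUMMARY_GROUPS = OrderedDict([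
--     ("FP32 Compute",  ["FP32 FMA", "FP32 Mul", "FP32 Add", "FP32 Other"]),
--     ("FP64",          ["FP64"]),
--     ("Integer",       ["Integer Arith", "Bit / Logic", "Address / LEA", "Conversion"]),
--     ("Data Movement", ["Move / Select", "Load Param", "Load Const"]),
--     ("Global Memory", ["Load Global", "Store Global"]),
--     ("Shared Memory", ["Load Shared", "Store Shared"]),
--     ("Async Copy",    ["Async Copy"]),
--     ("Control Flow",  ["Branch", "Barrier / Sync", "Predicate"]),
--     ("Misc / NOP",    ["Misc / NOP", "Atomic", "Warp Ops"]),
-- ])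
--
-- # reverse map: category -> its summary group
-- CAT_TO_GROUP = {c: g for g, cats in SUMMARY_GROUPS.items() for c in cats}
--
-- def _group_counts(detail: dict[str, int]) -> dict[str, int]:
--     totals = dict.fromkeys(SUMMARY_GROUPS, 0)
--     unk = 0
--     for cat, n in detail.items():
--         if cat == "Unknown":
--             unk += n
--         else:
--             g = CAT_TO_GROUP.get(cat)
--             if g is not None:
--                 totals[g] += n
--     result = OrderedDict((g, t) for g, t in totals.items() if t > 0)
--     if unk > 0:
--         result["Unknown"] = unk
--     return result
-- ===== Notes on version B (the rewrite author's own statement) =====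
-- stated objective: idiomatic
-- what changed: Replaces the per-group rescan of the detail dict (a dict.get for every category of every group) by a module-level reverse map category->group and a single accumulating pass over detail.items(), emitting the accumulated totals in SUMMARY_GROUPS order.
import Mathlib
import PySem

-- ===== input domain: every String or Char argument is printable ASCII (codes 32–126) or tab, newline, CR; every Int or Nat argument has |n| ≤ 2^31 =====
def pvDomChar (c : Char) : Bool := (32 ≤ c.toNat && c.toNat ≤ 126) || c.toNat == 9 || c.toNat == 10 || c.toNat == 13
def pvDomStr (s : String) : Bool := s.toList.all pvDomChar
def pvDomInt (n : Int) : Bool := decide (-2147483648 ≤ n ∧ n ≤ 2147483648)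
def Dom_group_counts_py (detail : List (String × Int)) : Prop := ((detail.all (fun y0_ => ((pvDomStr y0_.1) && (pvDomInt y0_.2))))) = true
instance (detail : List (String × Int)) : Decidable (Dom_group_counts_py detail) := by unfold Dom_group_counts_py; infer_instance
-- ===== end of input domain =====

-- B replaces A's per-group rescan of the detail dict by a reverse map category→group and one
-- accumulating pass over detail (objective: idiomatic single-pass aggregation; return value only).

-- ===== PORT A =====
def pvSummaryGroups : List (String × List String) := [
  ("FP32 Compute",  ["FP32 FMA", "FP32 Mul", "FP32 Add", "FP32 Other"]),
  ("FP64",          ["FP64"]),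
  ("Integer",       ["Integer Arith", "Bit / Logic", "Address / LEA", "Conversion"]),
  ("Data Movement", ["Move / Select", "Load Param", "Load Const"]),
  ("Global Memory", ["Load Global", "Store Global"]),
  ("Shared Memory", ["Load Shared", "Store Shared"]),
  ("Async Copy",    ["Async Copy"]),
  ("Control Flow",  ["Branch", "Barrier / Sync", "Predicate"]),
  ("Misc / NOP",    ["Misc / NOP", "Atomic", "Warp Ops"])]

def group_counts_py (detail : List (String × Int)) : List (String × Int) :=
  let d := PySem.Dict.mk detail
  let result := pvSummaryGroups.foldl (fun result gc =>
    let total := gc.2.foldl (fun s c => s + d.getD c 0) 0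
    if total > 0 then result ++ [(gc.1, total)] else result) []
  let unk := d.getD "Unknown" 0
  if unk > 0 then result ++ [("Unknown", unk)] else result

-- ===== PORT B =====
-- reverse map: category -> its summary group (Source B's CAT_TO_GROUP comprehension)
def pvCatToGroup : PySem.Dict String String :=
  PySem.Dict.ofList (pvSummaryGroups.flatMap fun gc => gc.2.map fun c => (c, gc.1))

-- one step of B's accumulating pass (the body of Source B's for-loop)
def pvStep (s : PySem.Dict String Int × Int) (p : String × Int) : PySem.Dict String Int × Int :=
  if p.1 = "Unknown" then (s.1, s.2 + p.2)
  else match pvCatToGroup.get? p.1 with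
    | some g => (s.1.modify g 0 (· + p.2), s.2)
    | none => s

-- Source B's totals = dict.fromkeys(SUMMARY_GROUPS, 0)
def pvTotals0 : PySem.Dict String Int := PySem.Dict.ofList (pvSummaryGroups.map fun gc => (gc.1, 0))

def group_counts_py_alt (detail : List (String × Int)) : List (String × Int) :=
  let st := detail.foldl pvStep (pvTotals0, 0)
  let result := st.1.items.foldl (fun acc p => if p.2 > 0 then acc ++ [p] else acc) []
  if st.2 > 0 then result ++ [("Unknown", st.2)] else result

-- ===== PRECONDITION & SPEC =====
-- Pre_ excludes association lists with duplicate keys: those do not represent any Python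
-- dict (A's parameter is a dict, whose keys are unique), and on them the first-match
-- convention and B's summing pass legitimately disagree.
def Pre_group_counts_py (detail : List (String × Int)) : Prop := (detail.map Prod.fst).Nodup
instance (detail : List (String × Int)) : Decidable (Pre_group_counts_py detail) := by unfold Pre_group_counts_py; infer_instance
def pvWitness_group_counts_py : (List (String × Int)) := [("FP32 FMA", 3), ("Unknown", 2), ("Branch", 0)]

def Spec_group_counts_py (detail : List (String × Int)) (out : List (String × Int)) : Prop := out = group_counts_py_alt detail
instance (detail : List (String × Int)) (out : List (String × Int)) : Decidable (Spec_group_counts_py detail out) := by unfold Spec_group_counts_py; infer_instance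

-- ===== CLAIM (what is proved, stated in full; the proofs are below) =====
def Claim_equal_group_counts_py : Prop := ∀ (detail : List (String × Int)), Dom_group_counts_py detail → Pre_group_counts_py detail → Spec_group_counts_py detail (group_counts_py detail)

-- ===== LEMMAS AND PROOFS =====

-- contribution of one detail entry to group g under B's pass
def pvContrib (g : String) (p : String × Int) : Int :=
  if p.1 = "Unknown" then 0 else if pvCatToGroup.get? p.1 = some g then p.2 else 0

def pvUnkC (p : String × Int) : Int := if p.1 = "Unknown" then p.2 else 0

def pvNames : List String := pvSummaryGroups.map Prod.fst

lemma pvCatToGroup_eq_mk : pvCatToGroup = PySem.Dict.mk [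
  ("FP32 FMA", "FP32 Compute"), ("FP32 Mul", "FP32 Compute"), ("FP32 Add", "FP32 Compute"), ("FP32 Other", "FP32 Compute"),
  ("FP64", "FP64"),
  ("Integer Arith", "Integer"), ("Bit / Logic", "Integer"), ("Address / LEA", "Integer"), ("Conversion", "Integer"),
  ("Move / Select", "Data Movement"), ("Load Param", "Data Movement"), ("Load Const", "Data Movement"),
  ("Load Global", "Global Memory"), ("Store Global", "Global Memory"),
  ("Load Shared", "Shared Memory"), ("Store Shared", "Shared Memory"),
  ("Async Copy", "Async Copy"),
  ("Branch", "Control Flow"), ("Barrier / Sync", "Control Flow"), ("Predicate", "Control Flow"),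
  ("Misc / NOP", "Misc / NOP"), ("Atomic", "Misc / NOP"), ("Warp Ops", "Misc / NOP")] := by decide

-- a successful reverse-map lookup lands in (k, g) ∈ the literal table
lemma pvLookup_mem {k g : String} (h : pvCatToGroup.get? k = some g) :
    (k, g) ∈ pvCatToGroup.items :=
  PySem.Dict.mem_items_of_get?_eq_some _ h

lemma pvLookup_name {k g : String} (h : pvCatToGroup.get? k = some g) : g ∈ pvNames := by
  have hm := pvLookup_mem h
  rw [pvCatToGroup_eq_mk] at hm
  simp only [List.mem_cons, List.not_mem_nil, or_false, Prod.mk.injEq] at hm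
  rcases hm with ⟨-, rfl⟩|⟨-, rfl⟩|⟨-, rfl⟩|⟨-, rfl⟩|⟨-, rfl⟩|⟨-, rfl⟩|⟨-, rfl⟩|⟨-, rfl⟩|⟨-, rfl⟩|⟨-, rfl⟩|⟨-, rfl⟩|⟨-, rfl⟩|⟨-, rfl⟩|⟨-, rfl⟩|⟨-, rfl⟩|⟨-, rfl⟩|⟨-, rfl⟩|⟨-, rfl⟩|⟨-, rfl⟩|⟨-, rfl⟩|⟨-, rfl⟩|⟨-, rfl⟩|⟨-, rfl⟩ <;> decide

-- the table fact: for a group row gc of the summary table, membership of k in gc's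
-- category list is exactly "k is not 'Unknown' and the reverse map sends k to gc.1"
lemma pvTable {gc : String × List String} (hgc : gc ∈ pvSummaryGroups) (k : String) :
    (k ∈ gc.2) ↔ (¬ k = "Unknown" ∧ pvCatToGroup.get? k = some gc.1) := by
  have hgc' : gc ∈ pvSummaryGroups := hgc
  simp only [pvSummaryGroups, List.mem_cons, List.not_mem_nil, or_false] at hgc'
  rcases hgc' with rfl|rfl|rfl|rfl|rfl|rfl|rfl|rfl|rfl <;>
  · constructor
    · intro hk
      fin_cases hk <;> exact ⟨by decide, by decide⟩
    · intro ⟨hne, hg⟩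
      have hm := PySem.Dict.mem_items_of_get?_eq_some _ hg
      rw [pvCatToGroup_eq_mk] at hm
      simp at hm
      simpa using hm

-- first-match lookup on a nodup-keyed assoc list equals the sum of matching values
lemma pvGetD_eq_sum (detail : List (String × Int)) (hnd : (detail.map Prod.fst).Nodup) (c : String) :
    (PySem.Dict.mk detail).getD c 0 = (detail.map (fun p => if p.1 = c then p.2 else 0)).sum := by
  induction detail with
  | nil =>
    show (PySem.Dict.empty.getD c 0 : Int) = _
    simp [PySem.Dict.getD_empty]
  | cons p rest ih =>
    obtain ⟨k, v⟩ := p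
    simp only [List.map_cons, List.nodup_cons] at hnd
    rw [PySem.Dict.getD_eq_get?_getD, PySem.Dict.get?_mk_cons]
    by_cases hkc : k = c
    · subst hkc
      simp only [BEq.rfl, if_true, Option.getD_some, List.map_cons, List.sum_cons]
      have hz : (rest.map (fun p => if p.1 = k then p.2 else 0)).sum = 0 := by
        apply List.sum_eq_zero
        intro x hx
        simp only [List.mem_map] at hx
        obtain ⟨q, hq, rfl⟩ := hx
        have : q.1 ≠ k := by
          intro hqk
          exact hnd.1 (hqk ▸ List.mem_map_of_mem hq)
        simp [this]
      omega
    · have hb : (k == c) = false := by simp [hkc]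
      simp only [hb, Bool.false_eq_true, if_false, List.map_cons, List.sum_cons, if_neg hkc,
        ← PySem.Dict.getD_eq_get?_getD]
      rw [ih hnd.2]
      omega

-- foldl-sum of an Int-valued function is the sum of the mapped list
lemma pvFoldl_add {α : Type} (h : α → Int) (l : List α) (s : Int) :
    l.foldl (fun a x => a + h x) s = s + (l.map h).sum := by
  induction l generalizing s with
  | nil => simp
  | cons x xs ih => simp [ih]; ring

-- sum over a nodup category list of first-match lookups = one pass over detail
lemma pvSwap (cats : List String) (hcs : cats.Nodup) (detail : List (String × Int))
    (hnd : (detail.map Prod.fst).Nodup) :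
    (cats.map (fun c => (PySem.Dict.mk detail).getD c 0)).sum
      = (detail.map (fun p => if p.1 ∈ cats then p.2 else 0)).sum := by
  induction cats with
  | nil => simp
  | cons c cs ih =>
    simp only [List.nodup_cons] at hcs
    simp only [List.map_cons, List.sum_cons]
    rw [pvGetD_eq_sum detail hnd c, ih hcs.2]
    rw [← List.sum_map_add]
    congr 1
    apply List.map_congr_left
    intro p _
    by_cases h1 : p.1 = c
    · rw [h1]; simp [hcs.1]
    · simp [h1, List.mem_cons]

-- characterization of B's accumulating pass
lemma pvLoop (l : List (String × Int)) (t : PySem.Dict String Int) (u : Int)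
    (hk : t.keys = pvNames) :
    (l.foldl pvStep (t, u)).1.keys = pvNames
      ∧ (∀ g, (l.foldl pvStep (t, u)).1.getD g 0 = t.getD g 0 + (l.map (pvContrib g)).sum)
      ∧ (l.foldl pvStep (t, u)).2 = u + (l.map pvUnkC).sum := by
  induction l generalizing t u with
  | nil => simp [hk]
  | cons p rest ih =>
    simp only [List.foldl_cons]
    by_cases hu : p.1 = "Unknown"
    · have hs : pvStep (t, u) p = (t, u + p.2) := by simp [pvStep, hu]
      rw [hs]
      obtain ⟨h1, h2, h3⟩ := ih t (u + p.2) hk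
      refine ⟨h1, fun g => ?_, ?_⟩
      · rw [h2 g]; simp [pvContrib, hu]; try ring
      · rw [h3]; simp [pvUnkC, hu]; try ring
    · cases hg : pvCatToGroup.get? p.1 with
      | none =>
        have hs : pvStep (t, u) p = (t, u) := by simp [pvStep, hu, hg]
        rw [hs]
        obtain ⟨h1, h2, h3⟩ := ih t u hk
        refine ⟨h1, fun g => ?_, ?_⟩
        · rw [h2 g]; simp [pvContrib, hu, hg]
        · rw [h3]; simp [pvUnkC, hu]
      | some g' =>
        have hs : pvStep (t, u) p = (t.modify g' 0 (· + p.2), u) := by simp [pvStep, hu, hg]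
        rw [hs]
        have hgmem : g' ∈ pvNames := pvLookup_name hg
        have hcont : t.contains g' = true := (PySem.Dict.contains_iff_mem_keys t g').2 (hk ▸ hgmem)
        have hkeys : (t.modify g' 0 (· + p.2)).keys = pvNames := by
          rw [PySem.Dict.keys_modify, PySem.Dict.keys_insert_of_contains _ _ hcont, hk]
        obtain ⟨h1, h2, h3⟩ := ih (t.modify g' 0 (· + p.2)) u hkeys
        refine ⟨h1, fun g => ?_, ?_⟩
        · rw [h2 g, PySem.Dict.getD_modify]
          by_cases hgg : g = g'
          · subst hgg; simp [pvContrib, hu, hg]; try ring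
          · have : ¬ pvCatToGroup.get? p.1 = some g := by simp [hg, Ne.symm hgg]
            simp [pvContrib, hu, this, hgg]
        · rw [h3]; simp [pvUnkC, hu]

-- ===== VERDICT (by name: the statement is the Claim_ definition above) =====
set_option maxHeartbeats 1000000 in
theorem group_counts_py_spec : Claim_equal_group_counts_py := by
  intro detail _hdom hpre
  unfold Spec_group_counts_py
  have hk0 : pvTotals0.keys = pvNames := by decide
  obtain ⟨hK, hG, hU⟩ := pvLoop detail pvTotals0 0 hk0
  have hnodupN : pvNames.Nodup := by decide
  have hitems :
      (detail.foldl pvStep (pvTotals0, 0)).1.items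
        = pvNames.map (fun g =>
            (g, (detail.foldl pvStep (pvTotals0, 0)).1.getD g 0)) := by
    have hndK : (detail.foldl pvStep (pvTotals0, 0)).1.keys.Nodup := by
      rw [hK]; exact hnodupN
    rw [PySem.Dict.items_eq_map_keys _ hndK 0, hK]
  have hgroups :
      pvSummaryGroups.foldl (fun result gc =>
        let total := gc.2.foldl (fun s c => s + (PySem.Dict.mk detail).getD c 0) 0
        if total > 0 then result ++ [(gc.1, total)] else result) []
      = (detail.foldl pvStep (pvTotals0, 0)).1.items.foldl
          (fun acc p => if p.2 > 0 then acc ++ [p] else acc) [] := by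
    rw [hitems]
    unfold pvNames
    rw [List.foldl_map, List.foldl_map]
    apply PySem.List.foldl_congr_mem
    intro acc gc hgc
    have htot : gc.2.foldl (fun s c => s + (PySem.Dict.mk detail).getD c 0) 0
        = (detail.foldl pvStep (pvTotals0, 0)).1.getD gc.1 0 := by
      rw [pvFoldl_add (fun c => (PySem.Dict.mk detail).getD c 0) gc.2 0, hG gc.1]
      have hcnd : gc.2.Nodup := by
        revert hgc
        simp only [pvSummaryGroups, List.mem_cons, List.not_mem_nil, or_false]
        rintro (rfl|rfl|rfl|rfl|rfl|rfl|rfl|rfl|rfl) <;> decide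
      rw [pvSwap gc.2 hcnd detail hpre]
      have hz : pvTotals0.getD gc.1 0 = 0 := by
        revert hgc
        simp only [pvSummaryGroups, List.mem_cons, List.not_mem_nil, or_false]
        rintro (rfl|rfl|rfl|rfl|rfl|rfl|rfl|rfl|rfl) <;> decide
      rw [hz]
      have hmap : detail.map (fun p => if p.1 ∈ gc.2 then p.2 else 0) = detail.map (pvContrib gc.1) := by
        apply List.map_congr_left
        intro p _
        unfold pvContrib
        by_cases h1 : p.1 = "Unknown"
        · have hug : p.1 ∉ gc.2 := by
            intro hmem
            exact ((pvTable hgc p.1).1 hmem).1 h1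
          rw [h1] at hug
          simp [h1, hug]
        · by_cases h2 : pvCatToGroup.get? p.1 = some gc.1
          · have : p.1 ∈ gc.2 := (pvTable hgc p.1).2 ⟨h1, h2⟩
            simp [this, h1, h2]
          · have : p.1 ∉ gc.2 := fun hmem => h2 ((pvTable hgc p.1).1 hmem).2
            simp [this, h1, h2]
      rw [hmap]
    simp only [htot]
  have hunk : (PySem.Dict.mk detail).getD "Unknown" 0
      = (detail.foldl pvStep (pvTotals0, 0)).2 := by
    rw [hU, pvGetD_eq_sum detail hpre "Unknown", zero_add]
    rfl
  simp only [group_counts_py, group_counts_py_alt, hgroups, hunk]
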